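-- pv_equiv track=rewrite | github.com/ApolloAuto/apollo | modules/planning/planning_base/tools/log_util.py | get_lines_between
-- ===== SOURCE A (Python) =====
-- def get_lines_between(lines, st, ed=''):
--     """get valid log with keywords"""
--     valid_lines = []
--     found_start = False
--     for line in lines:
--         if st in line:
--             found_start = True
--         if len(ed) != 0 and ed in line:
--             break
--         if found_start:
--             valid_lines.append(line)
--     return valid_lines
-- ===== SOURCE B (Python) =====
-- def get_lines_between(lines, st, ed=''):
--     """get valid log with keywords"""
--     lines = list(lines)
--     if len(ed) != 0:
--         i_end = next((i for i, l in enumerate(lines) if ed in l), len(lines))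
--     else:
--         i_end = len(lines)
--     head = lines[:i_end]
--     i_st = next((i for i, l in enumerate(head) if st in l), len(head))
--     return head[i_st:]
-- ===== Notes on version B (the rewrite author's own statement) =====
-- stated objective: alternative
-- what changed: Instead of A's single stateful loop with a found_start flag and break, B computes two boundary indices (the first line containing ed, then the first line containing st before that boundary) via enumerate/next and returns one slice head[i_st:] of lines[:i_end].
import Mathlib
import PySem

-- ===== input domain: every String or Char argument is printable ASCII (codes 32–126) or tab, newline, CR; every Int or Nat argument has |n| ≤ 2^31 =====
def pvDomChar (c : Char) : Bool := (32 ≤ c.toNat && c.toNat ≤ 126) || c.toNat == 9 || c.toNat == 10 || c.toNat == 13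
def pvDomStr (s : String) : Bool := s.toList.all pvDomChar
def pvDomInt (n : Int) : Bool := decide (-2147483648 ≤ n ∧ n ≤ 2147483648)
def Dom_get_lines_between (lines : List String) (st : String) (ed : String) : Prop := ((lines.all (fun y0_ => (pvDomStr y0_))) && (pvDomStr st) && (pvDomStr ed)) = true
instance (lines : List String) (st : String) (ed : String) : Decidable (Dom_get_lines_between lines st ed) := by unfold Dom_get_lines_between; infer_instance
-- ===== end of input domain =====

-- B replaces A's stateful flag-and-break loop by computing two boundary indices and taking one slice; alternative decomposition, same cost.
-- ===== PORT A =====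
-- loop of A: state = (found_start, valid_lines); branch order as in the Python
def getLinesLoopA (st ed : String) : List String → Bool → List String → List String
  | [], _, acc => acc
  | line :: rest, found, acc =>
    let found' := if PySem.Str.isIn st line then true else found
    if PySem.Str.len ed ≠ 0 ∧ PySem.Str.isIn ed line then acc
    else getLinesLoopA st ed rest found' (if found' then acc ++ [line] else acc)

def get_lines_between (lines : List String) (st : String) (ed : String) : List String :=
  getLinesLoopA st ed lines false []

-- ===== PORT B =====
-- next((i for i, l in enumerate(xs) if p l), len(xs)) = List.findIdx (index of first match, length if none)
def get_lines_between_alt (lines : List String) (st : String) (ed : String) : List String :=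
  let iEnd := if PySem.Str.len ed ≠ 0 then lines.findIdx (fun l => PySem.Str.isIn ed l) else lines.length
  let head := lines.take iEnd      -- lines[:i_end], 0 ≤ i_end ≤ len(lines)
  let iSt := head.findIdx (fun l => PySem.Str.isIn st l)
  head.drop iSt                    -- head[i_st:], 0 ≤ i_st ≤ len(head)

-- ===== PRECONDITION & SPEC =====
def Spec_get_lines_between (lines : List String) (st : String) (ed : String) (out : List String) : Prop := out = get_lines_between_alt lines st ed
instance (lines : List String) (st : String) (ed : String) (out : List String) : Decidable (Spec_get_lines_between lines st ed out) := by unfold Spec_get_lines_between; infer_instance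

-- ===== CLAIM =====
def Claim_equal_get_lines_between : Prop := ∀ (lines : List String) (st : String) (ed : String), Dom_get_lines_between lines st ed → Spec_get_lines_between lines st ed (get_lines_between lines st ed)

-- ===== LEMMAS AND PROOFS =====

-- Key invariant of A's loop: once found, it appends the whole ed-truncated prefix;
-- before found, it contributes the dropWhile of that prefix.
theorem loopA_inv (st ed : String) (lines : List String) (found : Bool) (acc : List String) :
    getLinesLoopA st ed lines found acc =
      acc ++ (let tr := if PySem.Str.len ed ≠ 0 then lines.takeWhile (fun l => !PySem.Str.isIn ed l) else lines;
        if found then tr else tr.dropWhile (fun l => !PySem.Str.isIn st l)) := by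
  induction lines generalizing found acc with
  | nil => cases found <;> simp [getLinesLoopA]
  | cons line rest ih =>
    simp only [getLinesLoopA]
    by_cases hE : ed = ""
    · have hlen : ¬ (PySem.Str.len ed ≠ 0 ∧ PySem.Str.isIn ed line = true) := by
        subst hE; simp [PySem.Str.len]
      rw [if_neg hlen, ih]
      by_cases hst : PySem.Chars.isIn st.toList line.toList = true
      · cases found <;> simp [hE, PySem.Str.isIn, hst]
      · replace hst : PySem.Chars.isIn st.toList line.toList = false := by simpa using hst
        cases found <;> simp [hE, PySem.Str.isIn, hst]
    · have hlen : PySem.Str.len ed ≠ 0 := by simp [PySem.Str.len, hE]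
      by_cases hin : PySem.Chars.isIn ed.toList line.toList = true
      · rw [if_pos ⟨hlen, by simpa [PySem.Str.isIn] using hin⟩]
        cases found <;> simp [hE, PySem.Str.isIn, hin, List.takeWhile]
      · replace hin : PySem.Chars.isIn ed.toList line.toList = false := by simpa using hin
        rw [if_neg (by simp [PySem.Str.isIn, hin]), ih]
        by_cases hst : PySem.Chars.isIn st.toList line.toList = true
        · cases found <;> simp [hE, PySem.Str.isIn, hin, hst, List.takeWhile]
        · replace hst : PySem.Chars.isIn st.toList line.toList = false := by simpa using hst
          cases found <;> simp [hE, PySem.Str.isIn, hin, hst, List.takeWhile]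

-- Bridge: takeWhile/dropWhile on the negated predicate = take/drop at the first match index.
theorem takeWhile_not_eq_take_findIdx (q : String → Bool) (xs : List String) :
    xs.takeWhile (fun l => !q l) = xs.take (xs.findIdx q) := by
  induction xs with
  | nil => simp
  | cons x rest ih =>
    by_cases h : q x = true
    · simp [List.takeWhile, List.findIdx_cons, h]
    · replace h : q x = false := by simpa using h
      simp [List.takeWhile, List.findIdx_cons, h, ih]

theorem dropWhile_not_eq_drop_findIdx (q : String → Bool) (xs : List String) :
    xs.dropWhile (fun l => !q l) = xs.drop (xs.findIdx q) := by
  induction xs with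
  | nil => simp
  | cons x rest ih =>
    by_cases h : q x = true
    · simp [List.dropWhile, List.findIdx_cons, h]
    · replace h : q x = false := by simpa using h
      simp [List.dropWhile, List.findIdx_cons, h, ih]

-- ===== VERDICT =====
theorem get_lines_between_spec : Claim_equal_get_lines_between := by
  intro lines st ed _
  show get_lines_between lines st ed = get_lines_between_alt lines st ed
  rw [get_lines_between, loopA_inv]
  simp only [get_lines_between_alt, List.nil_append, Bool.false_eq_true, if_false]
  by_cases hE : PySem.Str.len ed ≠ 0
  · rw [if_pos hE, if_pos hE, dropWhile_not_eq_drop_findIdx, takeWhile_not_eq_take_findIdx]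
  · rw [if_neg hE, if_neg hE, dropWhile_not_eq_drop_findIdx, List.take_length]
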